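-- pv_equiv track=rewrite | github.com/Vergil0327/leetcode-history | String/564. Find the Closest Palindrome/solution.py | findGreaterPalindrome
-- ===== SOURCE A (Python) =====
-- def findGreaterPalindrome(s):
--     n = len(s)
--     arr = list(s)
--     l, r = 0, n-1
--     while l < r:
--         arr[r] = arr[l]
--         l, r = l+1, r-1
--
--     res = "".join(arr)
--     if int(res) > int(s):
--         return res
--
--     # find smaller
--
--     mid = (n-1)//2 # 取中間靠左的middle, 奇偶數長度都適用
--     carry = 1
--     for i in range(mid, -1, -1):
--         d = int(arr[i]) + carry
--         if d < 10: # 順利 += 1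
--             arr[i] = str(d)
--             carry = 0
--         else:
--             arr[i] = "0"
--
--         arr[n-1-i] = arr[i]
--
--     if carry == 1:
--         res = ["0"] * (n+1)
--         res[0] = res[-1] = "1"
--         return "".join(res)
--     else:
--         return "".join(arr)
-- ===== SOURCE B (Python) =====
-- def _mirror(p, n):
--     return p + p[::-1] if n % 2 == 0 else p + p[:-1][::-1]
--
-- def _plus_one(p):
--     # increment a digit string by one, keeping its length; None on all-9s overflow
--     if not p:
--         return None
--     head, last = p[:-1], p[-1]
--     if last == '9':
--         rest = _plus_one(head)
--         return None if rest is None else rest + '0'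
--     return head + chr(ord(last) + 1)
--
-- def findGreaterPalindrome(s):
--     n = len(s)
--     half = (n + 1) // 2
--     prefix = s[:half]
--     cand = _mirror(prefix, n)
--     if int(cand) > int(s):
--         return cand
--     inc = _plus_one(prefix)
--     if inc is None:
--         return "1" + "0" * (n - 1) + "1"
--     return _mirror(inc, n)
-- ===== Notes on version B (the rewrite author's own statement) =====
-- stated objective: simpler
-- what changed: A mirrors the string in place with a two-pointer loop and then increments it with an index-based per-digit carry loop that writes both arr[i] and arr[n-1-i]; B never mutates: it slices off the half prefix, builds the candidate by concatenating the prefix with its reversal, increments the prefix with a right-to-left recursion returning None on all-9s overflow, and mirrors the result the same way.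
-- outside the precondition, e.g. on findGreaterPalindrome('2 '): A returns '22', B returns '22'; on findGreaterPalindrome('1_0'): A returns '1_1', B returns '1_1'; on findGreaterPalindrome(' 11 '): A raises ValueError, B returns ' 22 '
import Mathlib
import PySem

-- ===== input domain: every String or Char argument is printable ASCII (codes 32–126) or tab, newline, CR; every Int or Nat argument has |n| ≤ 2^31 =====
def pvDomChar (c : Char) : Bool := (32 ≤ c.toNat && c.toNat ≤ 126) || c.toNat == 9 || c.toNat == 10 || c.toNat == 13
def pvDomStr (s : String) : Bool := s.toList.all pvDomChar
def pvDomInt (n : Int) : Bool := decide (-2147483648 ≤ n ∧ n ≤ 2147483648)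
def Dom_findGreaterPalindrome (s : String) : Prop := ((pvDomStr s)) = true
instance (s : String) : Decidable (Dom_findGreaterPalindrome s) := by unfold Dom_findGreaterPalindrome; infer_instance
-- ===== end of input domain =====

set_option maxHeartbeats 1000000


-- B replaces A's in-place two-pointer mirroring and index/carry loop over the whole array by pure
-- operations on the half-string (slice, mirror by reversal+concatenation, recursive increment with
-- an overflow option); equal cost, simpler decomposition. Equality is proved on digit-only strings.

-- ===== PORT A =====
-- list elements are chars (Python keeps 1-char strings); int(arr[i]) is ported as
-- PySem.Int.ofChars? [c] (none = ValueError, excluded by Pre_, defaulted to 0), and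
-- str(d) for the 0 ≤ d ≤ 9 reached in the d < 10 branch is its single digit char (headD).
-- Loops are ported as fuel recursions with fuel ≥ the Python trip count at each call site.

def pvAMirror : Nat → List Char → Int → Int → List Char
  | 0, arr, _, _ => arr
  | fuel+1, arr, l, r =>
    if l < r then
      pvAMirror fuel (PySem.List.pySetD arr r (PySem.List.pyGetD arr l ' ')) (l + 1) (r - 1)
    else arr

def pvACarry (n : Int) : Nat → List Char → Int → Int → List Char × Int
  | 0, arr, carry, _ => (arr, carry)
  | fuel+1, arr, carry, i =>
    if 0 ≤ i then
      let d := (PySem.Int.ofChars? [PySem.List.pyGetD arr i ' ']).getD 0 + carry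
      let ac :=
        if d < 10 then (PySem.List.pySetD arr i ((PySem.Int.toChars d).headD ' '), (0 : Int))
        else (PySem.List.pySetD arr i '0', carry)
      let arr2 := PySem.List.pySetD ac.1 (n - 1 - i) (PySem.List.pyGetD ac.1 i ' ')
      pvACarry n fuel arr2 ac.2 (i - 1)
    else (arr, carry)

def findGreaterPalindrome (s : String) : String :=
  let n : Int := PySem.Str.len s
  let arr := s.toList
  let arr := pvAMirror (n.toNat + 1) arr 0 (n - 1)
  let res := String.ofList arr
  match PySem.Int.ofStr? res, PySem.Int.ofStr? s with
  | some ri, some si =>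
    if ri > si then res
    else
      let mid := PySem.Int.floordiv (n - 1) 2
      let st := pvACarry n (n.toNat + 1) arr 1 mid
      if st.2 == 1 then
        let r0 := PySem.List.pyRepeat ['0'] (n + 1)
        let r1 := PySem.List.pySetD r0 0 '1'
        let r2 := PySem.List.pySetD r1 (-1) '1'
        String.ofList r2
      else String.ofList st.1
  | _, _ => ""

-- ===== PORT B =====
-- chr(ord(last)+1) is ported as Char.ofNat (last.toNat + 1): exact for the ASCII digits reached here.

def pvBMirror (p : List Char) (n : Int) : List Char :=
  if PySem.Int.mod n 2 == 0 then
    p ++ (PySem.List.slice? p none none (-1)).getD []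
  else
    p ++ (PySem.List.slice? (PySem.List.slice p none (some (-1))) none none (-1)).getD []

def pvBPlusOne : Nat → List Char → Option (List Char)
  | 0, _ => none
  | fuel+1, p =>
    if p = [] then none
    else
      let head := PySem.List.slice p none (some (-1))
      let last := PySem.List.pyGetD p (-1) ' '
      if last = '9' then
        match pvBPlusOne fuel head with
        | none => none
        | some rest => some (rest ++ ['0'])
      else some (head ++ [Char.ofNat (last.toNat + 1)])

def findGreaterPalindrome_alt (s : String) : String :=
  let n : Int := PySem.Str.len s
  let half := PySem.Int.floordiv (n + 1) 2
  let pre := PySem.List.slice s.toList none (some half)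
  let cand := pvBMirror pre n
  match PySem.Int.ofStr? (String.ofList cand) with
  | none => ""                                   -- int() ValueError: excluded by Pre_
  | some ci =>
    match PySem.Int.ofStr? s with
    | none => ""                                 -- int() ValueError: excluded by Pre_
    | some si =>
      if ci > si then String.ofList cand
      else
        match pvBPlusOne (pre.length + 1) pre with
        | none => String.ofList (['1'] ++ PySem.List.pyRepeat ['0'] (n - 1) ++ ['1'])
        | some inc => String.ofList (pvBMirror inc n)

-- ===== PRECONDITION & SPEC =====
-- Pre_ restricts to digit-only strings (s.isdigit()), the natural domain of the function: outside it
-- A usually raises ValueError from int() (on the mirrored string, on s, or on a per-digit int(arr[i])),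
-- and on the few int()-parseable near-digit strings where A still returns (e.g. trailing whitespace or
-- '_' digit separators, taken early on the compare-candidate path) B returns the same value anyway.
def Pre_findGreaterPalindrome (s : String) : Prop := PySem.Str.strIsdigit s = true
instance (s : String) : Decidable (Pre_findGreaterPalindrome s) := by unfold Pre_findGreaterPalindrome; infer_instance
def pvWitness_findGreaterPalindrome : String := ("191")
def Spec_findGreaterPalindrome (s : String) (out : String) : Prop := out = findGreaterPalindrome_alt s
instance (s : String) (out : String) : Decidable (Spec_findGreaterPalindrome s out) := by unfold Spec_findGreaterPalindrome; infer_instance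

-- ===== CLAIM (what is proved, stated in full; the proofs are below) =====
def Claim_equal_findGreaterPalindrome : Prop := ∀ (s : String), Dom_findGreaterPalindrome s → Pre_findGreaterPalindrome s → Spec_findGreaterPalindrome s (findGreaterPalindrome s)

-- ===== LEMMAS AND PROOFS =====

def pvPal (n : Nat) (x : List Char) : List Char := x ++ (x.take (n - x.length)).reverse

lemma pvPal_length (n : Nat) (x : List Char) (hx : x.length = (n+1)/2) :
    (pvPal n x).length = n := by
  simp [pvPal]; omega

lemma pvPal_get (n : Nat) (x : List Char) (hx : x.length = (n+1)/2) (j : Nat) (hj : j < n) :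
    (pvPal n x)[j]?.getD ' ' = if j < x.length then x[j]?.getD ' ' else x[n-1-j]?.getD ' ' := by
  by_cases h : j < x.length
  · simp only [pvPal, if_pos h, List.getElem?_append_left h]
  · simp only [pvPal, if_neg h]
    rw [List.getElem?_append_right (by omega)]
    have hlen : (x.take (n - x.length)).length = n - x.length := by simp; omega
    rw [List.getElem?_reverse (by omega), hlen]
    rw [List.getElem?_take_of_lt (by omega)]
    congr 2
    omega

lemma pvPal_set (n : Nat) (x : List Char) (hx : x.length = (n+1)/2) (i : Nat) (hi : i < x.length) (v : Char) :
    ((pvPal n x).set i v).set (n-1-i) v = pvPal n (x.set i v) := by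
  have hn : (pvPal n x).length = n := pvPal_length n x (by omega)
  have hn' : (pvPal n (x.set i v)).length = n := pvPal_length n _ (by simp [hx])
  have hL1 : ((pvPal n x).set i v).length = n := by simp [hn]
  have hin : i < n := by omega
  apply List.ext_getElem (by simp [hn, hn'])
  intro j hj1 hj2
  have hjn : j < n := by rw [hn'] at hj2; exact hj2
  rw [← Option.getD_some (a := (((pvPal n x).set i v).set (n-1-i) v)[j]) (b := ' '),
      ← List.getElem?_eq_getElem hj1,
      ← Option.getD_some (a := (pvPal n (x.set i v))[j]) (b := ' '),
      ← List.getElem?_eq_getElem hj2]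
  rw [pvPal_get n _ (by simp [hx]) j hjn]
  simp only [List.length_set]
  by_cases e2 : j = i
  · subst e2
    by_cases e1 : j = n - 1 - j
    · rw [← e1, List.getElem?_set_self (by omega)]
      rw [List.getElem?_set_self (by omega)]
      simp [hi]
    · rw [List.getElem?_set_ne (Ne.symm e1), List.getElem?_set_self (by omega)]
      simp only [if_pos hi]
      rw [List.getElem?_set_self (show j < x.length from hi)]
  · by_cases e1 : j = n - 1 - i
    · subst e1
      rw [List.getElem?_set_self (by omega)]
      by_cases hjx : n - 1 - i < x.length
      · -- then i ≥ n - x.length; with i < x.length and x.length=(n+1)/2 forces n-1-i... 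
        simp only [if_pos hjx]
        have : i = n - 1 - i := by omega
        exact absurd this.symm (by omega)
      · simp only [if_neg hjx]
        have h2 : n - 1 - (n - 1 - i) = i := by omega
        rw [h2, List.getElem?_set_self (by omega)]
    · rw [List.getElem?_set_ne (by omega), List.getElem?_set_ne (by omega)]
      rw [pvPal_get n x hx j hjn]
      by_cases hjx : j < x.length
      · simp only [if_pos hjx]
        rw [List.getElem?_set_ne (by omega)]
      · simp only [if_neg hjx]
        rw [List.getElem?_set_ne (by omega)]

lemma pvAMirror_spec (n h : Nat) (hh : h = (n+1)/2) :
    ∀ (d a fuel : Nat) (arr : List Char), arr.length = n → a + d = n - h → d ≤ fuel →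
    pvAMirror fuel arr (a : Int) ((n : Int) - 1 - (a : Int))
      = arr.take h ++ ((arr.drop a).take (n - h - a)).reverse ++ arr.drop (n - a) := by
  intro d
  induction d with
  | zero =>
    intro a fuel arr hlen ha _
    have hstop : ¬ ((a : Int) < (n : Int) - 1 - (a : Int)) := by omega
    have : pvAMirror fuel arr (a : Int) ((n : Int) - 1 - (a : Int)) = arr := by
      cases fuel with
      | zero => rfl
      | succ f => simp [pvAMirror, hstop]
    rw [this]
    have h1 : n - h - a = 0 := by omega
    have h2 : n - a = h := by omega
    simp [h1, h2]
  | succ d ih =>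
    intro a fuel arr hlen ha hfuel
    have ha' : a ≤ n - h - 1 := by omega
    have hhn : 2*h = n ∨ 2*h = n + 1 := by omega
    have hgo : (a : Int) < (n : Int) - 1 - (a : Int) := by omega
    obtain ⟨f, rfl⟩ : ∃ f, fuel = f + 1 := ⟨fuel - 1, by omega⟩
    simp only [pvAMirror, if_pos hgo]
    have hcast : (n : Int) - 1 - (a : Int) = ((n - 1 - a : Nat) : Int) := by omega
    have hread : PySem.List.pyGetD arr (a : Int) ' ' = arr.getD a ' ' := by
      simp [PySem.List.pyGetD_natCast]
    have hset : PySem.List.pySetD arr ((n : Int) - 1 - (a : Int)) (arr.getD a ' ')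
        = arr.set (n - 1 - a) (arr.getD a ' ') := by
      rw [hcast, PySem.List.pySetD_natCast]
    rw [hread, hset]
    set v := arr.getD a ' ' with hv
    set arr' := arr.set (n - 1 - a) v with harr'
    have hlen' : arr'.length = n := by simp [harr', hlen]
    have hstep : (a : Int) + 1 = ((a + 1 : Nat) : Int) := by push_cast; ring
    have hstep2 : (n : Int) - 1 - (a : Int) - 1 = (n : Int) - 1 - ((a+1 : Nat) : Int) := by push_cast; ring
    rw [hstep2, hstep, ih (a+1) f arr' hlen' (by omega) (by omega)]
    -- now rewrite the pieces of arr' back to arr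
    have hj : n - 1 - a < n := by omega
    have hjh : h ≤ n - 1 - a := by omega
    have t1 : arr'.take h = arr.take h := List.take_set_of_le hjh
    have t2 : arr'.drop (a+1) = (arr.drop (a+1)).set (n - 1 - a - (a+1)) v := by
      rw [harr', List.drop_set]
      simp [show ¬ (n - 1 - a < a + 1) by omega]
    have t3 : (arr'.drop (a+1)).take (n - h - (a+1)) = (arr.drop (a+1)).take (n - h - (a+1)) := by
      rw [t2, List.take_set_of_le (by omega)]
    have t4 : arr'.drop (n - (a+1)) = v :: arr.drop (n - a) := by
      rw [harr']
      have : n - (a+1) = n - 1 - a := by omega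
      rw [this, List.set_eq_take_cons_drop v (by omega)]
      have hdl : ((arr.take (n-1-a)) ++ (v :: arr.drop (n-1-a+1))).drop (n-1-a) = v :: arr.drop (n-1-a+1) := by
        have h0 : n-1-a = (arr.take (n-1-a)).length := by simp; omega
        nth_rewrite 1 [h0]
        exact List.drop_left
      rw [hdl, show n-1-a+1 = n-a by omega]
    rw [t1, t3, t4]
    -- and the goal's RHS: (arr.drop a).take (n-h-a) = arr[a] :: (arr.drop (a+1)).take (n-h-a-1)
    have hdrop : arr.drop a = v :: arr.drop (a+1) := by
      rw [List.drop_eq_getElem_cons (by omega)]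
      congr 1
      rw [hv, List.getD_eq_getElem _ _ (by omega)]
    rw [hdrop]
    have : n - h - a = (n - h - (a+1)) + 1 := by omega
    rw [this, List.take_succ_cons]
    simp
lemma pvCharOfToNat (c : Char) (m : Nat) (hm : c.toNat = m) (d : Char) (hd : d.toNat = m) : c = d := by
  apply Char.ext
  apply UInt32.toNat.inj
  show c.toNat = d.toNat
  omega

lemma pvDigitCases (c : Char) (h : PySem.Chars.isdigit c = true) :
    c = '0' ∨ c = '1' ∨ c = '2' ∨ c = '3' ∨ c = '4' ∨ c = '5' ∨ c = '6' ∨ c = '7' ∨ c = '8' ∨ c = '9' := by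
  simp [PySem.Chars.isdigit, Char.le_def, UInt32.le_iff_toNat_le] at h
  obtain ⟨h1, h2⟩ := h
  have hv : c.toNat = 48 ∨ c.toNat = 49 ∨ c.toNat = 50 ∨ c.toNat = 51 ∨ c.toNat = 52 ∨
      c.toNat = 53 ∨ c.toNat = 54 ∨ c.toNat = 55 ∨ c.toNat = 56 ∨ c.toNat = 57 := by
    omega
  rcases hv with hv|hv|hv|hv|hv|hv|hv|hv|hv|hv
  · exact Or.inl (pvCharOfToNat c _ hv '0' rfl)
  · exact Or.inr <| Or.inl (pvCharOfToNat c _ hv '1' rfl)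
  · exact Or.inr <| Or.inr <| Or.inl (pvCharOfToNat c _ hv '2' rfl)
  · exact Or.inr <| Or.inr <| Or.inr <| Or.inl (pvCharOfToNat c _ hv '3' rfl)
  · exact Or.inr <| Or.inr <| Or.inr <| Or.inr <| Or.inl (pvCharOfToNat c _ hv '4' rfl)
  · exact Or.inr <| Or.inr <| Or.inr <| Or.inr <| Or.inr <| Or.inl (pvCharOfToNat c _ hv '5' rfl)
  · exact Or.inr <| Or.inr <| Or.inr <| Or.inr <| Or.inr <| Or.inr <| Or.inl (pvCharOfToNat c _ hv '6' rfl)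
  · exact Or.inr <| Or.inr <| Or.inr <| Or.inr <| Or.inr <| Or.inr <| Or.inr <| Or.inl (pvCharOfToNat c _ hv '7' rfl)
  · exact Or.inr <| Or.inr <| Or.inr <| Or.inr <| Or.inr <| Or.inr <| Or.inr <| Or.inr <| Or.inl (pvCharOfToNat c _ hv '8' rfl)
  · exact Or.inr <| Or.inr <| Or.inr <| Or.inr <| Or.inr <| Or.inr <| Or.inr <| Or.inr <| Or.inr (pvCharOfToNat c _ hv '9' rfl)

-- value of int(c) for a digit char
lemma pvOfCharsDigit (c : Char) (h : PySem.Chars.isdigit c = true) :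
    PySem.Int.ofChars? [c] = some ((c.toNat : Int) - 48) := by
  rcases pvDigitCases c h with h|h|h|h|h|h|h|h|h|h <;> subst h <;> decide

-- str(int(c)+1) for digit c ≠ '9' is chr(ord(c)+1)
lemma pvToCharsSucc (c : Char) (h : PySem.Chars.isdigit c = true) (h9 : c ≠ '9') :
    (PySem.Int.toChars ((c.toNat : Int) - 48 + 1)).headD ' ' = Char.ofNat (c.toNat + 1) := by
  rcases pvDigitCases c h with h|h|h|h|h|h|h|h|h|h <;> first | (exact absurd h h9) | (subst h; decide)

-- str(int(c)) for digit c is c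
lemma pvToCharsSelf (c : Char) (h : PySem.Chars.isdigit c = true) :
    (PySem.Int.toChars ((c.toNat : Int) - 48)).headD ' ' = c := by
  rcases pvDigitCases c h with h|h|h|h|h|h|h|h|h|h <;> subst h <;> decide

lemma pvDigitLt (c : Char) (h : PySem.Chars.isdigit c = true) : (c.toNat : Int) - 48 < 10 ∧ 0 ≤ (c.toNat : Int) - 48 := by
  rcases pvDigitCases c h with h|h|h|h|h|h|h|h|h|h <;> subst h <;> decide

lemma pvDigitSucc (c : Char) (h : PySem.Chars.isdigit c = true) (h9 : c ≠ '9') :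
    PySem.Chars.isdigit (Char.ofNat (c.toNat + 1)) = true := by
  rcases pvDigitCases c h with h|h|h|h|h|h|h|h|h|h <;> first | (exact absurd h h9) | (subst h; decide)

def pvDigits (x : List Char) : Prop := ∀ c ∈ x, PySem.Chars.isdigit c = true

-- the double write arr[i] := v; arr[n-1-i] := arr[i] on a pal, with casts
lemma pvPal_write (n h : Nat) (hh : h = (n+1)/2) (x : List Char) (hx : x.length = h)
    (i : Nat) (hi : i < h) (v : Char) :
    PySem.List.pySetD ((pvPal n x).set i v) ((n : Int) - 1 - (i : Int))
        (PySem.List.pyGetD ((pvPal n x).set i v) (i : Int) ' ')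
      = pvPal n (x.set i v) := by
  have hn : (pvPal n x).length = n := pvPal_length n x (by omega)
  have hin : i < n := by omega
  have hread : PySem.List.pyGetD ((pvPal n x).set i v) (i : Int) ' ' = v := by
    rw [PySem.List.pyGetD_natCast, List.getD_eq_getElem?_getD, List.getElem?_set_self (by omega)]
    rfl
  rw [hread]
  have hcast : (n : Int) - 1 - (i : Int) = ((n - 1 - i : Nat) : Int) := by omega
  rw [hcast, PySem.List.pySetD_natCast]
  exact pvPal_set n x (by omega) i (by omega) v

-- read from a pal
lemma pvPal_read (n h : Nat) (hh : h = (n+1)/2) (x : List Char) (hx : x.length = h)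
    (i : Nat) (hi : i < h) :
    PySem.List.pyGetD (pvPal n x) (i : Int) ' ' = x[i]?.getD ' ' := by
  rw [PySem.List.pyGetD_natCast, List.getD_eq_getElem?_getD,
      pvPal_get n x (by omega) i (by omega)]
  simp [show i < x.length by omega]

lemma pvCarryZero (n h : Nat) (hh : h = (n+1)/2) :
    ∀ (i : Nat) (x : List Char) (fuel : Nat), x.length = h → pvDigits x → i < h → i + 1 ≤ fuel →
    pvACarry (n : Int) fuel (pvPal n x) 0 (i : Int) = (pvPal n x, 0) := by
  intro i
  induction i with
  | zero =>
    intro x fuel hx hd hi hfuel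
    obtain ⟨f, rfl⟩ : ∃ f, fuel = f + 1 := ⟨fuel - 1, by omega⟩
    simp only [pvACarry, if_pos (by norm_num : (0:Int) ≤ ((0:Nat):Int))]
    have hc : x[0]?.getD ' ' ∈ x := by
      have h0 : 0 < x.length := by omega
      rw [List.getElem?_eq_getElem h0]
      exact List.getElem_mem h0
    have hcd := hd _ hc
    rw [pvPal_read n h hh x hx 0 hi, pvOfCharsDigit _ hcd]
    have hlt := pvDigitLt _ hcd
    simp only [Option.getD_some, add_zero, if_pos hlt.1]
    rw [pvToCharsSelf _ hcd]
    rw [PySem.List.pySetD_natCast, pvPal_write n h hh x hx 0 hi]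
    have hself2 : x.set 0 (x[0]?.getD ' ') = x := by
      have h0 : (0:Nat) < x.length := by omega
      rw [List.getElem?_eq_getElem h0, Option.getD_some, List.set_getElem_self]
    rw [hself2]
    show pvACarry (n : Int) f (pvPal n x) 0 (((0:Nat) : Int) - 1) = (pvPal n x, 0)
    cases f with
    | zero => rfl
    | succ f' => simp [pvACarry]
  | succ i ih =>
    intro x fuel hx hd hi hfuel
    obtain ⟨f, rfl⟩ : ∃ f, fuel = f + 1 := ⟨fuel - 1, by omega⟩
    simp only [pvACarry, if_pos (by positivity : (0:Int) ≤ ((i+1:Nat):Int))]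
    have hil : i + 1 < x.length := by omega
    have hc : x[i+1]?.getD ' ' ∈ x := by
      rw [List.getElem?_eq_getElem hil]
      exact List.getElem_mem hil
    have hcd := hd _ hc
    rw [pvPal_read n h hh x hx (i+1) hi, pvOfCharsDigit _ hcd]
    have hlt := pvDigitLt _ hcd
    simp only [Option.getD_some, add_zero, if_pos hlt.1]
    rw [pvToCharsSelf _ hcd]
    rw [PySem.List.pySetD_natCast, pvPal_write n h hh x hx (i+1) hi]
    have hself2 : x.set (i+1) (x[i+1]?.getD ' ') = x := by
      rw [List.getElem?_eq_getElem hil, Option.getD_some, List.set_getElem_self]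
    rw [hself2]
    have : ((i+1:Nat) : Int) - 1 = ((i:Nat) : Int) := by push_cast; ring
    rw [this]
    exact ih x f hx hd (by omega) (by omega)

lemma pvTakeNeNil (x : List Char) (i : Nat) (h : i < x.length) : x.take (i+1) ≠ [] := by
  apply List.ne_nil_of_length_pos
  simp [List.length_take]
  omega

lemma pvGetLastTake (x : List Char) (i : Nat) (h : i < x.length) :
    (x.take (i+1)).getLast (pvTakeNeNil x i h) = x[i] := by
  rw [List.getLast_eq_getElem, List.getElem_take]
  have hl : (x.take (i+1)).length = i+1 := by simp; omega
  simp only [hl, Nat.add_sub_cancel]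

lemma pvDropLastTake (x : List Char) (i : Nat) (h : i < x.length) :
    (x.take (i+1)).dropLast = x.take i := by
  rw [List.dropLast_eq_take, List.take_take]
  congr 1
  simp [List.length_take]
  omega

lemma pvBPlusOne_take (x : List Char) (i f : Nat) (hi : i < x.length) :
    pvBPlusOne (f+1) (x.take (i+1)) =
      if x[i]?.getD ' ' = '9' then
        (match pvBPlusOne f (x.take i) with
         | none => none
         | some rest => some (rest ++ ['0']))
      else some (x.take i ++ [Char.ofNat ((x[i]?.getD ' ').toNat + 1)]) := by
  have hne := pvTakeNeNil x i hi
  simp only [pvBPlusOne, if_neg hne]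
  have hslice : PySem.List.slice (x.take (i+1)) none (some (-1)) = x.take i := by
    rw [PySem.List.slice_to_neg_one, pvDropLastTake x i hi]
  have hlast : PySem.List.pyGetD (x.take (i+1)) (-1) ' ' = x[i]?.getD ' ' := by
    rw [PySem.List.pyGetD_neg_one _ _ hne, pvGetLastTake x i hi, List.getElem?_eq_getElem hi]
    rfl
  rw [hslice, hlast]

lemma pvDigitLt9 (c : Char) (h : PySem.Chars.isdigit c = true) (h9 : c ≠ '9') :
    (c.toNat : Int) - 48 + 1 < 10 := by
  rcases pvDigitCases c h with h|h|h|h|h|h|h|h|h|h <;> first | (exact absurd h h9) | (subst h; decide)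

lemma pvNine : (('9' : Char).toNat : Int) - 48 + 1 = 10 := by decide

lemma pvDigitsSet (x : List Char) (hd : pvDigits x) (i : Nat) (v : Char)
    (hv : PySem.Chars.isdigit v = true) : pvDigits (x.set i v) := by
  intro c hc
  rcases List.mem_or_eq_of_mem_set hc with h | h
  · exact hd c h
  · exact h ▸ hv

lemma pvSetEq (x : List Char) (i : Nat) (hi : i < x.length) (v : Char) :
    x.set i v = x.take i ++ [v] ++ x.drop (i+1) := by
  rw [List.set_eq_take_cons_drop v hi]
  simp

lemma pvDropSet (x : List Char) (i : Nat) (hi : i < x.length) (v : Char) :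
    (x.set i v).drop i = v :: x.drop (i+1) := by
  rw [List.set_eq_take_cons_drop v hi]
  have hdl : ((x.take i) ++ (v :: x.drop (i+1))).drop i = v :: x.drop (i+1) := by
    have h0 : i = (x.take i).length := by simp; omega
    nth_rewrite 1 [h0]
    exact List.drop_left
  exact hdl

lemma pvMain (n h : Nat) (hh : h = (n+1)/2) :
    ∀ (i : Nat) (x : List Char) (fuel : Nat), x.length = h → pvDigits x → i < h → i + 1 ≤ fuel →
    pvACarry (n : Int) fuel (pvPal n x) 1 (i : Int) =
      (match pvBPlusOne (i + 2) (x.take (i+1)) with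
       | some q => (pvPal n (q ++ x.drop (i+1)), 0)
       | none => (pvPal n (List.replicate (i+1) '0' ++ x.drop (i+1)), 1)) := by
  intro i
  induction i with
  | zero =>
    intro x fuel hx hd hi hfuel
    obtain ⟨f, rfl⟩ : ∃ f, fuel = f + 1 := ⟨fuel - 1, by omega⟩
    have hxl : 0 < x.length := by omega
    simp only [pvACarry, if_pos (by norm_num : (0:Int) ≤ ((0:Nat):Int))]
    have hc : x[0]?.getD ' ' ∈ x := by
      rw [List.getElem?_eq_getElem hxl]; exact List.getElem_mem hxl
    have hcd := hd _ hc
    rw [pvPal_read n h hh x hx 0 hi, pvOfCharsDigit _ hcd]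
    rw [show (0:Nat) + 2 = 1 + 1 from rfl, pvBPlusOne_take x 0 1 hxl]
    by_cases c9 : x[0]?.getD ' ' = '9'
    · rw [c9, Option.getD_some]
      rw [pvNine, if_neg (by norm_num : ¬ ((10:Int) < 10)), if_pos rfl]
      simp only
      rw [PySem.List.pySetD_natCast, pvPal_write n h hh x hx 0 hi]
      have htail : ∀ arr carry, pvACarry (n:Int) f arr carry (((0:Nat):Int) - 1) = (arr, carry) := by
        intro arr carry
        cases f with
        | zero => rfl
        | succ f' => simp [pvACarry]
      rw [htail]
      have hbp : pvBPlusOne 1 (x.take 0) = none := by simp [pvBPlusOne]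
      rw [hbp]
      simp only
      congr 1
      rw [pvSetEq x 0 hxl '0']
      rfl
    · rw [Option.getD_some]
      rw [if_pos (pvDigitLt9 _ hcd c9), if_neg c9]
      simp only
      rw [pvToCharsSucc _ hcd c9]
      rw [PySem.List.pySetD_natCast, pvPal_write n h hh x hx 0 hi]
      have htail : ∀ arr, pvACarry (n:Int) f arr 0 (((0:Nat):Int) - 1) = (arr, 0) := by
        intro arr
        cases f with
        | zero => rfl
        | succ f' => simp [pvACarry]
      rw [htail]
      congr 2
      rw [pvSetEq x 0 hxl]
  | succ i ih =>
    intro x fuel hx hd hi hfuel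
    obtain ⟨f, rfl⟩ : ∃ f, fuel = f + 1 := ⟨fuel - 1, by omega⟩
    have hxl : i + 1 < x.length := by omega
    simp only [pvACarry, if_pos (by positivity : (0:Int) ≤ ((i+1:Nat):Int))]
    have hc : x[i+1]?.getD ' ' ∈ x := by
      rw [List.getElem?_eq_getElem hxl]; exact List.getElem_mem hxl
    have hcd := hd _ hc
    rw [pvPal_read n h hh x hx (i+1) hi, pvOfCharsDigit _ hcd]
    rw [show (i + 1) + 2 = (i+2) + 1 from rfl, pvBPlusOne_take x (i+1) (i+2) hxl]
    have hstep : ((i+1:Nat) : Int) - 1 = ((i:Nat) : Int) := by push_cast; ring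
    by_cases c9 : x[i+1]?.getD ' ' = '9'
    · rw [c9, Option.getD_some]
      rw [pvNine, if_neg (by norm_num : ¬ ((10:Int) < 10)), if_pos rfl]
      simp only
      rw [PySem.List.pySetD_natCast, pvPal_write n h hh x hx (i+1) hi, hstep]
      rw [ih (x.set (i+1) '0') f (by simp [hx]) (pvDigitsSet x hd _ _ (by decide)) (by omega) (by omega)]
      rw [List.take_set_of_le (le_refl (i+1))]
      rw [show (x.set (i+1) '0').drop (i+1) = '0' :: x.drop (i+2) from pvDropSet x (i+1) hxl '0']
      rcases hq : pvBPlusOne (i+2) (x.take (i+1)) with _ | rest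
      · simp only
        congr 1
        rw [show (i+1) + 1 = i + 2 from rfl]
        congr 1
        rw [show List.replicate (i+2) '0' = List.replicate (i+1) '0' ++ ['0'] from by
              rw [← List.replicate_succ' ]]
        simp
      · simp only
        congr 2
        exact List.append_cons rest '0' (x.drop (i+2))
    · rw [Option.getD_some]
      rw [if_pos (pvDigitLt9 _ hcd c9), if_neg c9]
      simp only
      rw [pvToCharsSucc _ hcd c9]
      rw [PySem.List.pySetD_natCast, pvPal_write n h hh x hx (i+1) hi, hstep]
      rw [pvCarryZero n h hh i (x.set (i+1) (Char.ofNat ((x[i+1]?.getD ' ').toNat + 1))) f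
            (by simp [hx]) (pvDigitsSet x hd _ _ (pvDigitSucc _ hcd c9)) (by omega) (by omega)]
      congr 2
      exact pvSetEq x (i+1) hxl _

lemma pvBPlusOne_length : ∀ (f : Nat) (p q : List Char), pvBPlusOne f p = some q → q.length = p.length := by
  intro f
  induction f with
  | zero => intro p q hq; simp [pvBPlusOne] at hq
  | succ f ih =>
    intro p q hq
    by_cases hp : p = []
    · simp [pvBPlusOne, hp] at hq
    · simp only [pvBPlusOne, if_neg hp] at hq
      rw [PySem.List.slice_to_neg_one] at hq
      by_cases h9 : PySem.List.pyGetD p (-1) ' ' = '9'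
      · rw [if_pos h9] at hq
        rcases hr : pvBPlusOne f p.dropLast with _ | rest
        · rw [hr] at hq; simp at hq
        · rw [hr] at hq
          simp at hq
          have := ih _ _ hr
          have hl : p.length ≠ 0 := by simpa [List.length_eq_zero_iff] using hp
          rw [← hq]
          simp [this, List.length_dropLast]
          omega
      · rw [if_neg h9] at hq
        simp at hq
        have hl : p.length ≠ 0 := by simpa [List.length_eq_zero_iff] using hp
        rw [← hq]
        simp [List.length_dropLast]
        omega

lemma pvBMirror_pal (n h : Nat) (hh : h = (n+1)/2) (hn : 1 ≤ n) (q : List Char) (hq : q.length = h) :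
    pvBMirror q (n : Int) = pvPal n q := by
  unfold pvBMirror pvPal
  rw [show (2:Int) = ((2:Nat):Int) from rfl, PySem.Int.mod_natCast]
  by_cases hp : n % 2 = 0
  · rw [hp]
    simp only [Nat.cast_zero, BEq.rfl, if_true, PySem.List.slice?_none_none_neg_one, Option.getD_some]
    have : n - q.length = q.length := by omega
    rw [this, List.take_length]
  · have h1 : n % 2 = 1 := by omega
    rw [h1]
    simp only [Nat.cast_one, PySem.List.slice_to_neg_one, PySem.List.slice?_none_none_neg_one,
      Option.getD_some, show ((1:Int) == 0) = false from rfl]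
    have h2 : n - q.length = q.length - 1 := by omega
    rw [h2, List.dropLast_eq_take, hq]
    simp

lemma pvSetDNegOne (xs : List Char) (hne : xs ≠ []) (v : Char) :
    PySem.List.pySetD xs (-1) v = xs.set (xs.length - 1) v := by
  have hl : xs.length ≠ 0 := by simpa [List.length_eq_zero_iff] using hne
  simp [PySem.List.pySetD, PySem.List.pySet?, PySem.List.pyIdx?,
        show -(xs.length:Int) ≤ -1 by omega]

lemma pvTenOne (n : Nat) (hn : 1 ≤ n) :
    PySem.List.pySetD (PySem.List.pySetD (PySem.List.pyRepeat ['0'] (((n+1:Nat)):Int)) 0 '1') (-1) '1'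
      = ['1'] ++ PySem.List.pyRepeat ['0'] (((n-1:Nat)):Int) ++ ['1'] := by
  rw [PySem.List.pyRepeat_singleton, PySem.List.pyRepeat_singleton]
  have h1 : (((n+1:Nat)):Int).toNat = n + 1 := by omega
  have h2 : (((n-1:Nat)):Int).toNat = n - 1 := by omega
  rw [h1, h2]
  have h3 : PySem.List.pySetD (List.replicate (n+1) '0') 0 '1' = '1' :: List.replicate n '0' := by
    rw [PySem.List.pySetD_of_nonneg _ _ (by norm_num)]
    rw [List.replicate_succ, show ((0:Int).toNat) = 0 from rfl, List.set_cons_zero]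
  rw [h3, pvSetDNegOne _ (by simp) '1']
  have h4 : ('1' :: List.replicate n '0').length - 1 = n := by simp
  rw [h4]
  rw [show ('1' :: List.replicate n '0').set n '1' = '1' :: (List.replicate n '0').set (n-1) '1' from by
        cases n with
        | zero => simp
        | succ m => simp [List.set_cons_succ]]
  congr 1
  rw [List.set_eq_take_cons_drop '1' (by simp; omega)]
  rw [List.take_replicate, List.drop_replicate]
  congr 1
  · congr 1; omega
  · simp [show n - (n - 1 + 1) = 0 from by omega]

lemma pvMirror_top (n h : Nat) (hh : h = (n+1)/2) (cs : List Char) (hlen : cs.length = n) (hn : 1 ≤ n) :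
    pvAMirror (n+1) cs 0 ((n:Int) - 1) = pvPal n (cs.take h) := by
  have hs := pvAMirror_spec n h hh (n - h) 0 (n+1) cs hlen (by omega) (by omega)
  simp only [Nat.cast_zero, sub_zero, Nat.sub_zero, List.drop_zero] at hs
  rw [hs, show List.drop n cs = ([] : List Char) from by rw [← hlen]; exact List.drop_length]
  unfold pvPal
  have hl : (cs.take h).length = h := by simp [List.length_take]; omega
  rw [hl, List.take_take]
  rw [show min (n - h) h = n - h from by omega]
  simp

lemma pvEquiv (s : String) (hPre : PySem.Str.strIsdigit s = true) :
    findGreaterPalindrome s = findGreaterPalindrome_alt s := by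
  have hPre' : PySem.Chars.strIsdigit s.toList = true := by
    rw [← PySem.Str.strIsdigit_eq]; exact hPre
  simp only [PySem.Chars.strIsdigit, Bool.and_eq_true, List.all_eq_true, Bool.not_eq_true'] at hPre'
  obtain ⟨hne', hall⟩ := hPre'
  have hne : s.toList ≠ [] := fun hnil => by simp [hnil] at hne'
  have hn : 1 ≤ s.toList.length := by
    cases hcs0 : s.toList with
    | nil => exact absurd hcs0 hne
    | cons a t => simp
  set cs := s.toList with hcs
  set n := cs.length with hnn
  set h := (n+1)/2 with hh
  have hd : pvDigits cs := fun c hc => hall c hc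
  have hhn : 1 ≤ h := by omega
  have hdh : pvDigits (cs.take h) := fun c hc => hd c (List.mem_of_mem_take hc)
  have hlh : (cs.take h).length = h := by simp [List.length_take]; omega
  unfold findGreaterPalindrome findGreaterPalindrome_alt
  simp only [PySem.Str.len_eq, ← hcs, ← hnn, Int.toNat_natCast]
  rw [pvMirror_top n h hh cs rfl hn]
  rw [show ((n:Int) + 1) = ((n+1 : Nat) : Int) from by push_cast; ring,
      show (2:Int) = ((2:Nat):Int) from rfl,
      PySem.Int.floordiv_natCast, ← hh, PySem.List.slice_to_natCast]
  rw [pvBMirror_pal n h hh hn (cs.take h) hlh]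
  cases h1 : PySem.Int.ofStr? (String.ofList (pvPal n (cs.take h))) with
  | none =>
    cases h2 : PySem.Int.ofStr? s <;> rfl
  | some ri =>
    cases h2 : PySem.Int.ofStr? s with
    | none => rfl
    | some si =>
      simp only
      by_cases hgt : ri > si
      · rw [if_pos hgt, if_pos hgt]
      · rw [if_neg hgt, if_neg hgt]
        rw [show ((n:Int) - 1) = ((n-1 : Nat) : Int) from by omega,
            PySem.Int.floordiv_natCast,
            show (n-1)/2 = h - 1 from by omega]
        rw [pvMain n h hh (h-1) (cs.take h) (n+1) hlh hdh (by omega) (by omega)]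
        rw [show (h-1)+1 = h from by omega, show (h-1)+2 = h+1 from by omega]
        rw [List.take_take, show min h h = h from by omega, hlh]
        rcases hq : pvBPlusOne (h+1) (cs.take h) with _ | q
        · simp only
          rw [show ((1:Int) == 1) = true from rfl, if_pos rfl]
          congr 1
          exact pvTenOne n hn
        · simp only
          rw [show ((0:Int) == 1) = false from rfl]
          simp only [Bool.false_eq_true, if_false]
          congr 1
          · rw [show (cs.take h).drop h = [] from List.drop_eq_nil_of_le (by omega),
                List.append_nil]
            exact (pvBMirror_pal n h hh hn q (by rw [pvBPlusOne_length _ _ _ hq, hlh])).symm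

-- ===== VERDICT (by name: the statement is the Claim_ definition above) =====
theorem findGreaterPalindrome_spec : Claim_equal_findGreaterPalindrome := by
  intro s _ hPre
  unfold Spec_findGreaterPalindrome
  exact pvEquiv s hPre
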